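-- pv_equiv track=rewrite | github.com/HunterLaugh/codewars_kata_python | kata_6_how_much.py | howmuch
-- ===== SOURCE A (Python) =====
-- def howmuch(m, n):
-- 	if m>n:
-- 		temp=m
-- 		m=n
-- 		n=temp
-- #	M=7*b+2
-- #	M=9*c+1
-- 	res=[]
-- 	for t_m in range(m,n+1):
-- 		if  (t_m-2)%7==0 and (t_m-1)%9==0:
-- 			t_b=(t_m-2)//7
-- 			t_c=(t_m-1)//9
-- 			res.append(["M: "+str(t_m),"B: "+str(t_b),"C: "+str(t_c)])
--
-- 	return res
-- ===== SOURCE B (Python) =====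
-- def howmuch(m, n):
--     if m > n:
--         m, n = n, m
--     # CRT: M % 7 == 2 and M % 9 == 1  <=>  M % 63 == 37; step directly by the period 63
--     start = m + (37 - m) % 63
--     return [["M: " + str(M), "B: " + str((M - 2) // 7), "C: " + str((M - 1) // 9)]
--             for M in range(start, n + 1, 63)]
-- ===== Notes on version B (the rewrite author's own statement) =====
-- stated objective: faster
-- what changed: Instead of scanning every integer in [m,n] and testing both modular conditions, B solves the CRT congruence once (M %% 63 == 37) and enumerates only the solutions by stepping from the first one in range by the period 63.
import Mathlib
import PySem

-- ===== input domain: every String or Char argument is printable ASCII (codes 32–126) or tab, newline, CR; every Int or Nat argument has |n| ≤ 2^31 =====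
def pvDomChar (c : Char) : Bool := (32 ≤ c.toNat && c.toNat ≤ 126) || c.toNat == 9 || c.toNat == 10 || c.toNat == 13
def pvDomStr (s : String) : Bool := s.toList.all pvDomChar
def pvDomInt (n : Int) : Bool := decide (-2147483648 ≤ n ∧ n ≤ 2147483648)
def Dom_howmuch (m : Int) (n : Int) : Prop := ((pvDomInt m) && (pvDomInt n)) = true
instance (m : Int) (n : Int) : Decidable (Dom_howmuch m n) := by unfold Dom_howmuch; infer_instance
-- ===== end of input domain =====

-- B replaces A's per-integer scan of [m,n] by CRT: M%7==2 and M%9==1 iff M%63==37, so B steps through the solutions directly with stride 63 (faster by a constant factor ~63).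


-- ===== PORT A =====
def pvRow (t : Int) : List String :=
  ["M: " ++ PySem.Int.toStr t,
   "B: " ++ PySem.Int.toStr (PySem.Int.floordiv (t - 2) 7),
   "C: " ++ PySem.Int.toStr (PySem.Int.floordiv (t - 1) 9)]

def howmuch (m : Int) (n : Int) : List (List String) :=
  let p := if m > n then (n, m) else (m, n)
  (PySem.List.pyRange p.1 (p.2 + 1) 1).foldl
    (fun res t_m =>
      if PySem.Int.mod (t_m - 2) 7 == 0 && PySem.Int.mod (t_m - 1) 9 == 0 then
        res ++ [pvRow t_m]
      else res) []

-- ===== PORT B =====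
def howmuch_alt (m : Int) (n : Int) : List (List String) :=
  let p := if m > n then (n, m) else (m, n)
  let start := p.1 + PySem.Int.mod (37 - p.1) 63
  (PySem.List.pyRange start (p.2 + 1) 63).map pvRow

-- ===== PRECONDITION & SPEC =====
def Spec_howmuch (m : Int) (n : Int) (out : List (List String)) : Prop := out = howmuch_alt m n
instance (m : Int) (n : Int) (out : List (List String)) : Decidable (Spec_howmuch m n out) := by unfold Spec_howmuch; infer_instance

-- ===== CLAIM (what is proved, stated in full; the proofs are below) =====
def Claim_equal_howmuch : Prop := ∀ (m : Int) (n : Int), Dom_howmuch m n → Spec_howmuch m n (howmuch m n)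

-- ===== LEMMAS AND PROOFS =====

-- the stepped range has strictly increasing entries
lemma pairwise_lt_pyRange_63 (a b : Int) :
    List.Pairwise (· < ·) (PySem.List.pyRange a b 63) := by
  rw [PySem.List.pyRange_of_pos a b (by norm_num)]
  exact (List.pairwise_lt_range).map _ (fun h => by omega)

-- A's filtered unit range IS B's stepped range
lemma filter_eq_stepped (m n1 : Int) :
    (PySem.List.pyRange m n1 1).filter
      (fun t => PySem.Int.mod (t - 2) 7 == 0 && PySem.Int.mod (t - 1) 9 == 0)
    = PySem.List.pyRange (m + PySem.Int.mod (37 - m) 63) n1 63 := by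
  apply List.Perm.eq_of_pairwise
    (le := (· < ·)) (fun a b _ _ hab hba => absurd hba (lt_asymm hab))
  · exact (PySem.List.pairwise_lt_pyRange_one m n1).filter _
  · exact pairwise_lt_pyRange_63 _ _
  · rw [List.perm_ext_iff_of_nodup
      ((PySem.List.nodup_pyRange_one m n1).filter _)
      ((pairwise_lt_pyRange_63 _ _).imp ne_of_lt)]
    intro x
    rw [List.mem_filter, PySem.List.mem_pyRange_one,
      PySem.List.mem_pyRange_iff_of_pos (by norm_num : (0:Int) < 63) x,
      PySem.Int.mod_eq_emod_of_pos (by norm_num : (0:Int) < 63)]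
    simp only [Bool.and_eq_true, beq_iff_eq,
      PySem.Int.mod_eq_emod_of_pos (by norm_num : (0:Int) < 7),
      PySem.Int.mod_eq_emod_of_pos (by norm_num : (0:Int) < 9)]
    omega

-- ===== VERDICT (by name: the statement is the Claim_ definition above) =====
theorem howmuch_spec : Claim_equal_howmuch := by
  intro m n _
  unfold Spec_howmuch howmuch howmuch_alt
  rw [PySem.List.foldl_append_if, filter_eq_stepped, List.nil_append]
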